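-- pv_equiv track=rewrite | github.com/mhold3n/Larrick_multi | src/larrak2/realworld/surrogates.py | _merge_data_status
-- ===== SOURCE A (Python) =====
-- def _merge_data_status(statuses: list[str]) -> str:
--     normalized = [str(s).strip().lower() for s in statuses if str(s).strip()]
--     if not normalized:
--         return "ok"
--     if any("degraded_off" in s for s in normalized):
--         return "degraded_off"
--     if any("degraded_warn" in s for s in normalized):
--         return "degraded_warn"
--     return "ok"
-- ===== SOURCE B (Python) =====
-- def _merge_data_status(statuses: list[str]) -> str:
--     saw_warn = False
--     for s in statuses:
--         t = str(s).strip()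
--         if not t:
--             continue
--         t = t.lower()
--         if "degraded_off" in t:
--             return "degraded_off"
--         if "degraded_warn" in t:
--             saw_warn = True
--     return "degraded_warn" if saw_warn else "ok"
-- ===== Notes on version B (the rewrite author's own statement) =====
-- stated objective: simpler
-- what changed: Replaces building an intermediate normalized list plus two separate any() scans with a single accumulating pass that returns 'degraded_off' early and keeps one saw_warn flag.
import Mathlib
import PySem

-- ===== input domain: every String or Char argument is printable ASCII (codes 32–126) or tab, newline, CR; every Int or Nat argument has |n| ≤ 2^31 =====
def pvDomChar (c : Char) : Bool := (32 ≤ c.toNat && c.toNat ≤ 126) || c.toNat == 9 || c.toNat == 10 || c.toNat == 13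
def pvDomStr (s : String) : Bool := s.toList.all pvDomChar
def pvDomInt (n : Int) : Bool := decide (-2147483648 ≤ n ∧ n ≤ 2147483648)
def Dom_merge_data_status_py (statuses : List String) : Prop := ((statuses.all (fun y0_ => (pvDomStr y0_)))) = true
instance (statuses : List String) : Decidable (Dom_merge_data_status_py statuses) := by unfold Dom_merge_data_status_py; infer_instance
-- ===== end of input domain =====

-- B replaces A's normalized-list-then-two-any-scans by one accumulating pass with an early
-- return and a saw_warn flag (objective: simpler; same asymptotic cost).


-- ===== PORT A =====
def merge_data_status_py (statuses : List String) : String :=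
  let normalized :=
    (statuses.filter (fun s => !(PySem.Str.strip s == ""))).map
      (fun s => PySem.Str.lower (PySem.Str.strip s))
  if normalized = [] then "ok"
  else if normalized.any (fun s => PySem.Str.isIn "degraded_off" s) then "degraded_off"
  else if normalized.any (fun s => PySem.Str.isIn "degraded_warn" s) then "degraded_warn"
  else "ok"

-- ===== PORT B =====
-- one pass: skip blanks, early "degraded_off", remember whether a warn was seen
def mergeAltGo : List String → Bool → String
  | [], saw_warn => if saw_warn then "degraded_warn" else "ok"
  | s :: rest, saw_warn =>
    let t := PySem.Str.strip s
    if t == "" then mergeAltGo rest saw_warn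
    else
      let t := PySem.Str.lower t
      if PySem.Str.isIn "degraded_off" t then "degraded_off"
      else mergeAltGo rest (saw_warn || PySem.Str.isIn "degraded_warn" t)

def merge_data_status_py_alt (statuses : List String) : String :=
  mergeAltGo statuses false

-- ===== PRECONDITION & SPEC =====
def Spec_merge_data_status_py (statuses : List String) (out : String) : Prop := out = merge_data_status_py_alt statuses
instance (statuses : List String) (out : String) : Decidable (Spec_merge_data_status_py statuses out) := by unfold Spec_merge_data_status_py; infer_instance

-- ===== CLAIM (what is proved, stated in full; the proofs are below) =====
def Claim_equal_merge_data_status_py : Prop := ∀ (statuses : List String), Dom_merge_data_status_py statuses → Spec_merge_data_status_py statuses (merge_data_status_py statuses)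

-- ===== LEMMAS AND PROOFS =====

-- characterisation of B's loop in terms of A's normalized list
theorem mergeAltGo_eq (l : List String) (saw : Bool) :
    mergeAltGo l saw =
      (let n := (l.filter (fun s => !(PySem.Str.strip s == ""))).map
          (fun s => PySem.Str.lower (PySem.Str.strip s));
       if n.any (fun s => PySem.Str.isIn "degraded_off" s) then "degraded_off"
       else if saw || n.any (fun s => PySem.Str.isIn "degraded_warn" s) then "degraded_warn"
       else "ok") := by
  induction l generalizing saw with
  | nil => simp [mergeAltGo]
  | cons s rest ih =>
    by_cases hs : PySem.Str.strip s == ""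
    · simp [mergeAltGo, hs, ih]
    · by_cases hoff : PySem.Str.isIn "degraded_off" (PySem.Str.lower (PySem.Str.strip s))
      · have hs' : ¬ PySem.Str.strip s = "" := by simpa using hs
        simp only [mergeAltGo]; simp at hoff ⊢; simp [hoff, hs']
      · by_cases hw : PySem.Str.isIn "degraded_warn" (PySem.Str.lower (PySem.Str.strip s)) <;>
          cases saw <;>
          simp_all [mergeAltGo, Bool.or_comm]

-- ===== VERDICT (by name: the statement is the Claim_ definition above) =====
theorem merge_data_status_py_spec : Claim_equal_merge_data_status_py := by
  intro statuses _
  unfold Spec_merge_data_status_py merge_data_status_py merge_data_status_py_alt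
  rw [mergeAltGo_eq]
  simp only [Bool.false_or]
  split_ifs with h1 h2 h3 <;> simp_all [List.eq_nil_iff_forall_not_mem] <;>
    first
      | (obtain ⟨x, hx, hne, -⟩ := h2; exact h1 _ x hx hne rfl)
      | (obtain ⟨x, hx, hne, -⟩ := h3; exact h1 _ x hx hne rfl)
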